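-- pv_equiv track=rewrite | github.com/Abhishek-03113/Daily-Leetcode | code/python/Contest-05-30/C.py | solve
-- ===== SOURCE A (Python) =====
-- from typing import List
-- from collections import deque
--
-- def count_regions(grid: List[List[int]]) -> int:
--     m, n = len(grid), len(grid[0])
--     visited = [[False] * n for _ in range(m)]
--     regions = 0
--
--     def bfs(i: int, j: int):
--         queue = deque([(i, j)])
--         visited[i][j] = True
--         while queue:
--             x, y = queue.popleft()
--             for dx, dy in [(0, 1), (1, 0), (0, -1), (-1, 0)]:
--                 nx, ny = x + dx, y + dy
--                 if 0 <= nx < m and 0 <= ny < n and grid[nx][ny] == 0 and not visited[nx][ny]: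
--                     visited[nx][ny] = True
--                     queue.append((nx, ny))
--
--     for i in range(m):
--         for j in range(n):
--             if grid[i][j] == 0 and not visited[i][j]:
--                 bfs(i, j)
--                 regions += 1
--     return regions
--
-- def solve(grid: List[List[int]]) -> int:
--     m, n = len(grid), len(grid[0])
--     initial_regions = count_regions(grid)
--     count = 0
--     for i in range(m):
--         for j in range(n):
--             if grid[i][j] == 0:
--                 grid[i][j] = 1
--                 new_regions = count_regions(grid)
--                 if new_regions == 3:
--                     count += 1
--                 grid[i][j] = 0
--     return count
-- ===== SOURCE B (Python) =====
-- from typing import List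
--
-- def _regions_by_labels(g: List[List[int]], m: int, n: int) -> int:
--     # connected-component count by min-label relaxation (no per-seed traversal):
--     # every empty cell starts labelled with its own raster index; sweep to a fixpoint
--     # taking the min of each cell's label and its empty neighbours' labels; the
--     # number of cells whose final label is their own index is the region count.
--     lab = {(i, j): i * n + j for i in range(m) for j in range(n) if g[i][j] == 0}
--     changed = True
--     while changed:
--         changed = False
--         new = {}
--         for (i, j), v in lab.items():
--             best = v
--             for q in ((i, j + 1), (i + 1, j), (i, j - 1), (i - 1, j)):
--                 w = lab.get(q)
--                 if w is not None and w < best: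
--                     best = w
--             new[(i, j)] = best
--             if best != v:
--                 changed = True
--         lab = new
--     return sum(1 for (i, j), v in lab.items() if v == i * n + j)
--
-- def solve(grid: List[List[int]]) -> int:
--     m, n = len(grid), len(grid[0])
--     count = 0
--     for i in range(m):
--         for j in range(n):
--             if grid[i][j] == 0:
--                 g2 = [row[:] for row in grid]
--                 g2[i][j] = 1
--                 if _regions_by_labels(g2, m, n) == 3:
--                     count += 1
--     return count
-- ===== Notes on version B (the rewrite author's own statement) =====
-- stated objective: alternative
-- what changed: Region counting by per-seed BFS flood fill (a queue-driven traversal started from every unvisited empty cell) is replaced by min-label relaxation over all empty cells at once: each empty cell starts labelled with its own raster index, sweeps take the minimum with the neighbours' labels until a fixpoint, and the region count is the number of cells whose label stayed their own index; no queue, visited array or per-seed traversal remains.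
import Mathlib
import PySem

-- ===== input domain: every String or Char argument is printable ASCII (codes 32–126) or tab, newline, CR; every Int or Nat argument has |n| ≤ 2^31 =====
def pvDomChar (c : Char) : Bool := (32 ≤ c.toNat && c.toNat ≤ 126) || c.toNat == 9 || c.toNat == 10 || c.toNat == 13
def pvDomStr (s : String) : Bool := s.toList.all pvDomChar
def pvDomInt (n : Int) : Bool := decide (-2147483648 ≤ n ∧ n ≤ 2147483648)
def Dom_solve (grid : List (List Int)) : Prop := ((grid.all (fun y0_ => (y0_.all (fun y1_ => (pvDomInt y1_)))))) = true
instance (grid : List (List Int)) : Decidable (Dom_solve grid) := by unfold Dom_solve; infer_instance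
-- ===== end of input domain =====

-- B replaces the per-seed BFS flood fill by min-label relaxation over all empty cells at once
-- (each empty cell starts labelled with its raster index; sweep to a fixpoint taking the min with
-- neighbours' labels; regions = cells whose label stays their own index); objective: alternative.
-- A mutates `grid` in place but restores it before returning (net effect: none); B does not mutate.

-- shared trivial helpers (grid dimensions / cell access, both Pythons use m, n, grid[i][j])
def pvRows (g : List (List Int)) : Int := (g.length : Int)
def pvCols (g : List (List Int)) : Int := ((g.headD []).length : Int)
-- grid[i][j]; accessed by both programs only under 0 ≤ i < m, 0 ≤ j < n guards
def pvVal (g : List (List Int)) (p : Int × Int) : Int := (g.getD p.1.toNat []).getD p.2.toNat 1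
-- the double raster loop 'for i in range(m): for j in range(n):'
def pvRaster (g : List (List Int)) : List (Int × Int) :=
  (PySem.List.pyRange 0 (pvRows g) 1).flatMap
    (fun i => (PySem.List.pyRange 0 (pvCols g) 1).map (fun j => (i, j)))
-- grid[i][j] = 1 (A mutates and restores; B edits a copy — same functional update)
def pvSet1 (g : List (List Int)) (p : Int × Int) : List (List Int) :=
  g.modify p.1.toNat (fun row => row.set p.2.toNat 1)

-- ===== PORT A =====
def pvDirs : List (Int × Int) := [(0, 1), (1, 0), (0, -1), (-1, 0)]

-- the 'for dx, dy in …' body: mark and enqueue unvisited empty in-bounds neighbours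
def bfsPush (g : List (List Int)) (x y : Int)
    (acc : List (Int × Int) × List (Int × Int)) (d : Int × Int) :
    List (Int × Int) × List (Int × Int) :=
  let nx := x + d.1
  let ny := y + d.2
  if 0 ≤ nx ∧ nx < pvRows g ∧ 0 ≤ ny ∧ ny < pvCols g ∧ pvVal g (nx, ny) = 0 ∧ (nx, ny) ∉ acc.1
  then ((nx, ny) :: acc.1, acc.2 ++ [(nx, ny)])
  else acc

def bfsStep (g : List (List Int)) (x y : Int)
    (st : List (Int × Int) × List (Int × Int)) : List (Int × Int) × List (Int × Int) :=
  pvDirs.foldl (bfsPush g x y) st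

-- the 'while queue:' loop; fuel m*n+1 always suffices (proved below)
def bfsLoop (g : List (List Int)) : Nat → List (Int × Int) → List (Int × Int) → List (Int × Int)
  | 0, vis, _ => vis
  | _ + 1, vis, [] => vis
  | fuel + 1, vis, q :: qs =>
      let st := bfsStep g q.1 q.2 (vis, qs)
      bfsLoop g fuel st.1 st.2

def pvFuel (g : List (List Int)) : Nat := (pvRows g).toNat * (pvCols g).toNat + 1

def countRegions (g : List (List Int)) : Int :=
  ((pvRaster g).foldl (fun st p =>
    if pvVal g p = 0 ∧ p ∉ st.1
    then (bfsLoop g (pvFuel g) (p :: st.1) [p], st.2 + 1)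
    else st) (([] : List (Int × Int)), (0 : Int))).2

def solve (grid : List (List Int)) : Int :=
  let _initial_regions := countRegions grid   -- A computes it and never uses it
  (pvRaster grid).foldl (fun count p =>
    if pvVal grid p = 0
    then (if countRegions (pvSet1 grid p) = 3 then count + 1 else count)
    else count) 0

-- ===== PORT B =====
def pvIdx (g : List (List Int)) (p : Int × Int) : Int := p.1 * pvCols g + p.2

-- dict comprehension: every empty cell labelled with its raster index, raster order
def labInit (g : List (List Int)) : List ((Int × Int) × Int) :=
  (pvRaster g).filterMap (fun p => if pvVal g p = 0 then some (p, pvIdx g p) else none)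

-- lab.get(q)
def labGet (lab : List ((Int × Int) × Int)) (q : Int × Int) : Option Int :=
  (lab.find? (fun e => decide (e.1 = q))).map (·.2)

def pvNbrs (p : Int × Int) : List (Int × Int) :=
  [(p.1, p.2 + 1), (p.1 + 1, p.2), (p.1, p.2 - 1), (p.1 - 1, p.2)]

-- best = min of own label and present neighbours' labels
def bestOf (lab : List ((Int × Int) × Int)) (p : Int × Int) (v : Int) : Int :=
  (pvNbrs p).foldl (fun b q =>
    match labGet lab q with
    | some w => if w < b then w else b
    | none => b) v

-- one sweep: rebuild the dict and report whether anything changed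
def sweep (lab : List ((Int × Int) × Int)) : List ((Int × Int) × Int) × Bool :=
  lab.foldl (fun acc e =>
    let b := bestOf lab e.1 e.2
    (acc.1 ++ [(e.1, b)], acc.2 || decide (b ≠ e.2))) ([], false)

-- 'while changed:'; fuel (m*n)^2+1 always suffices (proved below)
def labLoop : Nat → List ((Int × Int) × Int) → List ((Int × Int) × Int)
  | 0, lab => lab
  | fuel + 1, lab =>
      let s := sweep lab
      if s.2 then labLoop fuel s.1 else s.1

def labFuel (g : List (List Int)) : Nat := ((pvRows g).toNat * (pvCols g).toNat) ^ 2 + 1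

def cclCount (g : List (List Int)) : Int :=
  (labLoop (labFuel g) (labInit g)).foldl
    (fun c e => if e.2 = pvIdx g e.1 then c + 1 else c) 0

def solve_alt (grid : List (List Int)) : Int :=
  (pvRaster grid).foldl (fun count p =>
    if pvVal grid p = 0
    then (if cclCount (pvSet1 grid p) = 3 then count + 1 else count)
    else count) 0

-- ===== PRECONDITION & SPEC =====
-- Pre_ excludes exactly the inputs on which Python A raises IndexError: the empty grid
-- (grid[0]) and grids with a row shorter than row 0 (the raster scan indexes grid[i][j]
-- for every j < len(grid[0])).
def Pre_solve (grid : List (List Int)) : Prop :=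
  grid ≠ [] ∧ ∀ row ∈ grid, (grid.headD []).length ≤ row.length
instance (grid : List (List Int)) : Decidable (Pre_solve grid) := by unfold Pre_solve; infer_instance

def pvWitness_solve : List (List Int) := [[0, 1, 0], [0, 0, 2]]

def Spec_solve (grid : List (List Int)) (out : Int) : Prop := out = solve_alt grid
instance (grid : List (List Int)) (out : Int) : Decidable (Spec_solve grid out) := by unfold Spec_solve; infer_instance

-- ===== CLAIM (what is proved, stated in full; the proofs are below) =====
def Claim_equal_solve : Prop := ∀ (grid : List (List Int)), Dom_solve grid → Pre_solve grid → Spec_solve grid (solve grid)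

-- ===== LEMMAS AND PROOFS =====

-- ---------- abstract graph notions (proof layer only) ----------
def pvInB (g : List (List Int)) (p : Int × Int) : Prop :=
  0 ≤ p.1 ∧ p.1 < pvRows g ∧ 0 ≤ p.2 ∧ p.2 < pvCols g
def pvZero (g : List (List Int)) (p : Int × Int) : Prop := pvInB g p ∧ pvVal g p = 0
def pvAdj (p q : Int × Int) : Prop := ∃ d ∈ pvDirs, q = (p.1 + d.1, p.2 + d.2)
def pvStep (g : List (List Int)) (p q : Int × Int) : Prop := pvZero g p ∧ pvZero g q ∧ pvAdj p q
def pvConn (g : List (List Int)) (p q : Int × Int) : Prop := Relation.ReflTransGen (pvStep g) p q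
def pvMinRep (g : List (List Int)) (p : Int × Int) : Prop :=
  pvZero g p ∧ ∀ q, pvConn g p q → pvIdx g p ≤ pvIdx g q
noncomputable def pvRepB (g : List (List Int)) (p : Int × Int) : Bool :=
  @decide (pvMinRep g p) (Classical.propDecidable _)
noncomputable def repCount (g : List (List Int)) (L : List (Int × Int)) : Int :=
  (L.countP (pvRepB g) : Int)
def zList (g : List (List Int)) : List (Int × Int) :=
  (pvRaster g).filter (fun p => decide (pvVal g p = 0))
def mapForm (g : List (List Int)) (F : Int × Int → Int) : List ((Int × Int) × Int) :=
  (zList g).map (fun p => (p, F p))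
def swStep (g : List (List Int)) (F : Int × Int → Int) (b : Int) (q : Int × Int) : Int :=
  if q ∈ zList g then (if F q < b then F q else b) else b
def SwF (g : List (List Int)) (F : Int × Int → Int) (p : Int × Int) : Int :=
  (pvNbrs p).foldl (swStep g F) (F p)
def INVB (g : List (List Int)) (F : Int × Int → Int) : Prop :=
  ∀ p, pvZero g p → (∃ q, pvConn g p q ∧ F p = pvIdx g q) ∧ F p ≤ pvIdx g p
def sumM (g : List (List Int)) (F : Int × Int → Int) : Nat :=
  ((zList g).map (fun p => (F p).toNat)).sum

-- ---------- basic facts ----------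
lemma pv_mem_raster (g : List (List Int)) (p : Int × Int) : p ∈ pvRaster g ↔ pvInB g p := by
  simp only [pvRaster, List.mem_flatMap, List.mem_map, PySem.List.mem_pyRange_one, pvInB]
  constructor
  · rintro ⟨i, hi, j, hj, rfl⟩; exact ⟨hi.1, hi.2, hj.1, hj.2⟩
  · rintro ⟨h1, h2, h3, h4⟩; exact ⟨p.1, ⟨h1, h2⟩, p.2, ⟨h3, h4⟩, rfl⟩

lemma pv_raster_pairwise (g : List (List Int)) :
    (pvRaster g).Pairwise (fun p q => pvIdx g p < pvIdx g q) := by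
  unfold pvRaster
  rw [List.pairwise_flatMap]
  constructor
  · intro i _
    rw [List.pairwise_map]
    refine (PySem.List.pairwise_lt_pyRange_one 0 (pvCols g)).imp ?_
    intro j j' hjj'
    simp only [pvIdx]
    omega
  · refine (PySem.List.pairwise_lt_pyRange_one 0 (pvRows g)).imp ?_
    intro i i' hii' x hx y hy
    simp only [List.mem_map, PySem.List.mem_pyRange_one] at hx hy
    obtain ⟨j, hj, rfl⟩ := hx
    obtain ⟨j', hj', rfl⟩ := hy
    simp only [pvIdx]
    nlinarith [hj.1, hj.2, hj'.1, hj'.2]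

lemma pv_raster_nodup (g : List (List Int)) : (pvRaster g).Nodup := by
  exact (pv_raster_pairwise g).imp (fun h => by rintro rfl; omega)

lemma pv_raster_length (g : List (List Int)) :
    (pvRaster g).length = (pvRows g).toNat * (pvCols g).toNat := by
  unfold pvRaster
  rw [List.length_flatMap]
  have h1 : ∀ i : Int, ((PySem.List.pyRange 0 (pvCols g) 1).map (fun j => (i, j))).length
      = (pvCols g).toNat := by
    intro i; rw [List.length_map, PySem.List.length_pyRange_one]; omega
  calc ((PySem.List.pyRange 0 (pvRows g) 1).map
          (fun i => ((PySem.List.pyRange 0 (pvCols g) 1).map (fun j => (i, j))).length)).sum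
      = ((PySem.List.pyRange 0 (pvRows g) 1).map (fun _ => (pvCols g).toNat)).sum := by
        simp only [h1]
    _ = (pvRows g).toNat * (pvCols g).toNat := by
        rw [List.map_const', List.sum_replicate, smul_eq_mul, PySem.List.length_pyRange_one]
        simp

lemma pv_adj_symm {p q : Int × Int} (h : pvAdj p q) : pvAdj q p := by
  obtain ⟨d, hd, rfl⟩ := h
  simp only [pvDirs, List.mem_cons] at hd
  rcases hd with rfl | rfl | rfl | rfl | h
  · exact ⟨(0, -1), by decide, by simp⟩
  · exact ⟨(-1, 0), by decide, by simp⟩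
  · exact ⟨(0, 1), by decide, by simp⟩
  · exact ⟨(1, 0), by decide, by simp⟩
  · simp at h

lemma pv_step_symm (g : List (List Int)) : Symmetric (pvStep g) := by
  intro a b h
  exact ⟨h.2.1, h.1, pv_adj_symm h.2.2⟩

lemma pv_conn_symm {g : List (List Int)} {p q : Int × Int} (h : pvConn g p q) : pvConn g q p := by
  exact Relation.ReflTransGen.symmetric (pv_step_symm g) h

lemma pv_conn_zero {g : List (List Int)} {p q : Int × Int} (hp : pvZero g p)
    (h : pvConn g p q) : pvZero g q := by
  induction h with
  | refl => exact hp
  | tail _ hstep _ => exact hstep.2.1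

lemma pv_adj_iff_nbrs (p q : Int × Int) : pvAdj p q ↔ q ∈ pvNbrs p := by
  simp only [pvAdj, pvDirs, pvNbrs, List.mem_cons, List.not_mem_nil, or_false, Prod.ext_iff]
  constructor
  · rintro ⟨d, (⟨h1, h2⟩ | ⟨h1, h2⟩ | ⟨h1, h2⟩ | ⟨h1, h2⟩), h3, h4⟩ <;> omega
  · rintro (h | h | h | h)
    · exact ⟨(0, 1), Or.inl ⟨rfl, rfl⟩, by constructor <;> simp <;> omega⟩
    · exact ⟨(1, 0), Or.inr (Or.inl ⟨rfl, rfl⟩), by constructor <;> simp <;> omega⟩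
    · exact ⟨(0, -1), Or.inr (Or.inr (Or.inl ⟨rfl, rfl⟩)), by constructor <;> simp <;> omega⟩
    · exact ⟨(-1, 0), Or.inr (Or.inr (Or.inr ⟨rfl, rfl⟩)), by constructor <;> simp <;> omega⟩

lemma pv_idx_nonneg {g : List (List Int)} {p : Int × Int} (h : pvInB g p) : 0 ≤ pvIdx g p := by
  obtain ⟨h1, h2, h3, h4⟩ := h
  have h5 : 0 ≤ p.1 * pvCols g := mul_nonneg h1 (by omega)
  unfold pvIdx; omega

lemma pv_idx_lt {g : List (List Int)} {p : Int × Int} (h : pvInB g p) :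
    pvIdx g p < pvRows g * pvCols g := by
  obtain ⟨h1, h2, h3, h4⟩ := h
  unfold pvIdx
  nlinarith

lemma pv_length_le_of_nodup_subset {l l' : List (Int × Int)} (hn : l.Nodup) (hs : l ⊆ l') :
    l.length ≤ l'.length := by
  exact (hn.subperm hs).length_le

-- ---------- A side: BFS computes the connected component ----------
lemma pv_push_spec (g : List (List Int)) (x y : Int) (ds : List (Int × Int)) :
    ∀ (vis Q : List (Int × Int)),
      ∃ added : List (Int × Int),
        ds.foldl (bfsPush g x y) (vis, Q) = (added.reverse ++ vis, Q ++ added) ∧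
        added.Nodup ∧
        (∀ z ∈ added, z ∉ vis ∧ pvZero g z ∧ ∃ d ∈ ds, z = (x + d.1, y + d.2)) ∧
        (∀ d ∈ ds, pvZero g (x + d.1, y + d.2) →
          (x + d.1, y + d.2) ∈ added.reverse ++ vis) := by
  induction ds with
  | nil =>
      intro vis Q
      exact ⟨[], by simp, by simp, by simp, by simp⟩
  | cons d ds ih =>
      intro vis Q
      simp only [List.foldl_cons]
      have hstep : bfsPush g x y (vis, Q) d =
          if 0 ≤ x + d.1 ∧ x + d.1 < pvRows g ∧ 0 ≤ y + d.2 ∧ y + d.2 < pvCols g ∧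
              pvVal g (x + d.1, y + d.2) = 0 ∧ (x + d.1, y + d.2) ∉ vis
          then ((x + d.1, y + d.2) :: vis, Q ++ [(x + d.1, y + d.2)])
          else (vis, Q) := rfl
      rw [hstep]
      by_cases hC : 0 ≤ x + d.1 ∧ x + d.1 < pvRows g ∧ 0 ≤ y + d.2 ∧ y + d.2 < pvCols g ∧
          pvVal g (x + d.1, y + d.2) = 0 ∧ (x + d.1, y + d.2) ∉ vis
      · rw [if_pos hC]
        obtain ⟨a', h1, h2, h3, h4⟩ := ih ((x + d.1, y + d.2) :: vis) (Q ++ [(x + d.1, y + d.2)])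
        refine ⟨(x + d.1, y + d.2) :: a', ?_, ?_, ?_, ?_⟩
        · rw [h1]
          simp
        · refine List.Nodup.cons ?_ h2
          intro hmem
          exact ((h3 _ hmem).1) List.mem_cons_self
        · intro z hz
          rcases List.mem_cons.mp hz with rfl | hz
          · exact ⟨hC.2.2.2.2.2, ⟨⟨hC.1, hC.2.1, hC.2.2.1, hC.2.2.2.1⟩, hC.2.2.2.2.1⟩,
              d, List.mem_cons_self, rfl⟩
          · obtain ⟨hnv, hzz, d', hd', rfl⟩ := h3 z hz
            exact ⟨fun hv => hnv (List.mem_cons_of_mem _ hv), hzz, d',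
              List.mem_cons_of_mem _ hd', rfl⟩
        · intro d' hd' hzd'
          rcases List.mem_cons.mp hd' with rfl | hd'
          · simp
          · have := h4 d' hd' hzd'
            simp only [List.mem_append, List.mem_reverse, List.mem_cons] at this ⊢
            tauto
      · rw [if_neg hC]
        obtain ⟨a', h1, h2, h3, h4⟩ := ih vis Q
        refine ⟨a', h1, h2, ?_, ?_⟩
        · intro z hz
          obtain ⟨hnv, hzz, d', hd', rfl⟩ := h3 z hz
          exact ⟨hnv, hzz, d', List.mem_cons_of_mem _ hd', rfl⟩
        intro d' hd' hzd'
        rcases List.mem_cons.mp hd' with rfl | hd'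
        · have hv : (x + d'.1, y + d'.2) ∈ vis := by
            by_contra hnv
            exact hC ⟨hzd'.1.1, hzd'.1.2.1, hzd'.1.2.2.1, hzd'.1.2.2.2, hzd'.2, hnv⟩
          simp [hv]
        · exact h4 d' hd' hzd' 

lemma pv_bfs_correct (g : List (List Int)) (s : Int × Int) (vis0 : List (Int × Int))
    (hzs : pvZero g s) (hdisj : ∀ x, pvConn g s x → x ∉ vis0) :
    ∀ (fuel : Nat) (vis Q : List (Int × Int)),
      (∀ q ∈ Q, pvConn g s q) →
      (∀ q ∈ Q, q ∈ vis) →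
      Q.Nodup →
      vis.Nodup →
      (∀ x ∈ vis, x ∈ pvRaster g) →
      s ∈ vis →
      (∀ x ∈ vis0, x ∈ vis) →
      (∀ x ∈ vis, x ∈ vis0 ∨ pvConn g s x) →
      (∀ x ∈ vis, x ∉ Q → x ∈ vis0 ∨ ∀ y, pvStep g x y → y ∈ vis) →
      (Q.length + ((pvRaster g).length - vis.length) < fuel) →
      (bfsLoop g fuel vis Q).Nodup ∧
        (∀ x, x ∈ bfsLoop g fuel vis Q ↔ x ∈ vis0 ∨ pvConn g s x) := by
  intro fuel
  induction fuel with
  | zero =>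
      intro vis Q _ _ _ _ _ _ _ _ _ hfuel
      omega
  | succ f ih =>
      intro vis Q hQconn hQsub hQnd hVnd hVin hs hV0 hVnew hproc hfuel
      rcases Q with _ | ⟨q, qs⟩
      · have hres : bfsLoop g (f + 1) vis [] = vis := rfl
        rw [hres]
        have hcl : ∀ x, pvConn g s x → x ∈ vis := by
          intro x hconn
          induction hconn with
          | refl => exact hs
          | tail hpre hstep ihx =>
              rcases hproc _ ihx (by simp) with h0 | hclosed
              · exact absurd h0 (hdisj _ hpre)
              · exact hclosed _ hstep
        exact ⟨hVnd, fun x => ⟨fun hx => hVnew x hx,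
          fun hx => hx.elim (hV0 x) (hcl x)⟩⟩
      · obtain ⟨added, heq, hnd, hmem, hcov⟩ := pv_push_spec g q.1 q.2 pvDirs vis qs
        have hst : bfsLoop g (f + 1) vis (q :: qs) =
            bfsLoop g f (added.reverse ++ vis) (qs ++ added) := by
          show bfsLoop g f (bfsStep g q.1 q.2 (vis, qs)).1 (bfsStep g q.1 q.2 (vis, qs)).2 = _
          unfold bfsStep
          rw [heq]
        rw [hst]
        have hqconn : pvConn g s q := hQconn q List.mem_cons_self
        have hqzero : pvZero g q := pv_conn_zero hzs hqconn
        have haddedconn : ∀ z ∈ added, pvConn g s z := by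
          intro z hz
          obtain ⟨_, hzz, d, hd, hdz⟩ := hmem z hz
          refine hqconn.tail ⟨hqzero, ?_, ⟨d, hd, ?_⟩⟩ <;> rw [← hdz] at * <;> exact hzz
        have hVin' : ∀ x ∈ added.reverse ++ vis, x ∈ pvRaster g := by
          intro x hx
          rcases List.mem_append.mp hx with hx | hx
          · exact (pv_mem_raster g x).mpr ((hmem x (List.mem_reverse.mp hx)).2.1).1
          · exact hVin x hx
        have hVnd' : (added.reverse ++ vis).Nodup := by
          rw [List.nodup_append]
          refine ⟨List.nodup_reverse.mpr hnd, hVnd, ?_⟩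
          intro z hz b hb heq
          exact (hmem z (List.mem_reverse.mp hz)).1 (heq ▸ hb)
        apply ih (added.reverse ++ vis) (qs ++ added)
        · intro z hz
          rcases List.mem_append.mp hz with hz | hz
          · exact hQconn z (List.mem_cons_of_mem _ hz)
          · exact haddedconn z hz
        · intro z hz
          rcases List.mem_append.mp hz with hz | hz
          · exact List.mem_append_right _ (hQsub z (List.mem_cons_of_mem _ hz))
          · exact List.mem_append_left _ (List.mem_reverse.mpr hz)
        · rw [List.nodup_append]
          refine ⟨hQnd.of_cons, hnd, ?_⟩
          intro z hzq b hb heq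
          exact (hmem b hb).1 (heq ▸ hQsub z (List.mem_cons_of_mem _ hzq))
        · exact hVnd'
        · exact hVin'
        · exact List.mem_append_right _ hs
        · intro x hx
          exact List.mem_append_right _ (hV0 x hx)
        · intro x hx
          rcases List.mem_append.mp hx with hx | hx
          · exact Or.inr (haddedconn x (List.mem_reverse.mp hx))
          · exact hVnew x hx
        · intro x hx hxQ
          rcases List.mem_append.mp hx with hxa | hxv
          · exact absurd (List.mem_append_right _ (List.mem_reverse.mp hxa)) hxQ
          · by_cases hxq : x = q
            · subst hxq
              refine Or.inr ?_
              rintro z ⟨_, hzz, d, hd, hdz⟩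
              subst hdz
              exact hcov d hd hzz
            · have hxnotq : x ∉ q :: qs := by
                intro hmem'
                rcases List.mem_cons.mp hmem' with h | h
                · exact hxq h
                · exact hxQ (List.mem_append_left _ h)
              rcases hproc x hxv hxnotq with h0 | hclosed
              · exact Or.inl h0
              · exact Or.inr (fun z hz => List.mem_append_right _ (hclosed z hz))
        · have hlen : (added.reverse ++ vis).length ≤ (pvRaster g).length :=
            pv_length_le_of_nodup_subset hVnd' hVin'
          simp only [List.length_append, List.length_reverse, List.length_cons] at *
          omega

lemma pv_repb_iff (g : List (List Int)) (p : Int × Int) : pvRepB g p = true ↔ pvMinRep g p := by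
  unfold pvRepB
  exact ⟨@of_decide_eq_true _ (Classical.propDecidable _), @decide_eq_true _ (Classical.propDecidable _)⟩

lemma pv_repb_cons (g : List (List Int)) (p : Int × Int) (R : List (Int × Int)) :
    repCount g (p :: R) = repCount g R + (if pvRepB g p = true then 1 else 0) := by
  unfold repCount
  rw [List.countP_cons]
  by_cases h : pvRepB g p = true <;> simp [h]

lemma pv_scan (g : List (List Int)) :
    ∀ (R L vis : List (Int × Int)) (r : Int),
      pvRaster g = L ++ R →
      (∀ x, x ∈ vis ↔ ∃ p, p ∈ L ∧ pvZero g p ∧ pvConn g p x) →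
      vis.Nodup →
      (R.foldl (fun st p =>
        if pvVal g p = 0 ∧ p ∉ st.1
        then (bfsLoop g (pvFuel g) (p :: st.1) [p], st.2 + 1)
        else st) (vis, r)).2 = r + repCount g R := by
  intro R
  induction R with
  | nil =>
      intro L vis r _ _ _
      simp [repCount]
  | cons p R ih =>
      intro L vis r hsplit hvis hnd
      have hpR : p ∈ pvRaster g := by
        rw [hsplit]; exact List.mem_append_right _ List.mem_cons_self
      have hpInB : pvInB g p := (pv_mem_raster g p).mp hpR
      have hpw := pv_raster_pairwise g
      rw [hsplit, List.pairwise_append] at hpw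
      obtain ⟨_, hpwR, hcross⟩ := hpw
      have hLlt : ∀ q ∈ L, pvIdx g q < pvIdx g p := fun q hq => hcross q hq p List.mem_cons_self
      have hRgt : ∀ q ∈ R, pvIdx g p < pvIdx g q := fun q hq => (List.pairwise_cons.mp hpwR).1 q hq
      have hkey : ∀ q, q ∈ pvRaster g → pvIdx g q < pvIdx g p → q ∈ L := by
        intro q hq hlt
        rw [hsplit] at hq
        rcases List.mem_append.mp hq with h | h
        · exact h
        · rcases List.mem_cons.mp h with rfl | h
          · omega
          · exact absurd (hRgt q h) (by omega)
      have hsplit' : pvRaster g = (L ++ [p]) ++ R := by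
        rw [hsplit, List.append_assoc]; rfl
      simp only [List.foldl_cons]
      by_cases h0 : pvVal g p = 0 ∧ p ∉ vis
      · rw [if_pos h0]
        have hpz : pvZero g p := ⟨hpInB, h0.1⟩
        have hdisj : ∀ x, pvConn g p x → x ∉ vis := by
          intro x hconn hxv
          obtain ⟨p', hp'L, hp'z, hp'conn⟩ := (hvis x).mp hxv
          exact h0.2 ((hvis p).mpr ⟨p', hp'L, hp'z, hp'conn.trans (pv_conn_symm hconn)⟩)
        have hvisraster : ∀ x ∈ vis, x ∈ pvRaster g := by
          intro x hx
          obtain ⟨p', _, hp'z, hconn⟩ := (hvis x).mp hx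
          exact (pv_mem_raster g x).mpr (pv_conn_zero hp'z hconn).1
        have hnd1 : (p :: vis).Nodup := List.nodup_cons.mpr ⟨h0.2, hnd⟩
        have hin1 : ∀ x ∈ p :: vis, x ∈ pvRaster g := by
          intro x hx
          rcases List.mem_cons.mp hx with rfl | hx
          · exact hpR
          · exact hvisraster x hx
        have hbfs := pv_bfs_correct g p vis hpz hdisj (pvFuel g) (p :: vis) [p]
          (by intro q hq; rcases List.mem_singleton.mp hq with rfl; exact Relation.ReflTransGen.refl)
          (by intro q hq; rcases List.mem_singleton.mp hq with rfl; exact List.mem_cons_self)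
          (by simp)
          hnd1
          hin1
          List.mem_cons_self
          (fun x hx => List.mem_cons_of_mem _ hx)
          (by
            intro x hx
            rcases List.mem_cons.mp hx with rfl | hx
            · exact Or.inr Relation.ReflTransGen.refl
            · exact Or.inl hx)
          (by
            intro x hx hxQ
            rcases List.mem_cons.mp hx with rfl | hx
            · simp at hxQ
            · exact Or.inl hx)
          (by
            show [p].length + ((pvRaster g).length - (p :: vis).length) < pvFuel g
            have hle : (p :: vis).length ≤ (pvRaster g).length :=
              pv_length_le_of_nodup_subset hnd1 hin1
            rw [pv_raster_length g] at hle
            unfold pvFuel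
            rw [pv_raster_length g]
            simp only [List.length_cons, List.length_nil] at hle ⊢
            omega)
        obtain ⟨hnd', hiff⟩ := hbfs
        have hiff' : ∀ x, x ∈ bfsLoop g (pvFuel g) (p :: vis) [p] ↔
            ∃ p', p' ∈ L ++ [p] ∧ pvZero g p' ∧ pvConn g p' x := by
          intro x
          rw [hiff x]
          constructor
          · rintro (hx | hconn)
            · obtain ⟨p', hp'L, hz, hc⟩ := (hvis x).mp hx
              exact ⟨p', List.mem_append_left _ hp'L, hz, hc⟩
            · exact ⟨p, List.mem_append_right _ (List.mem_singleton.mpr rfl), hpz, hconn⟩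
          · rintro ⟨p', hp', hz, hc⟩
            rcases List.mem_append.mp hp' with hp' | hp'
            · exact Or.inl ((hvis x).mpr ⟨p', hp', hz, hc⟩)
            · rcases List.mem_singleton.mp hp' with rfl
              exact Or.inr hc
        rw [ih (L ++ [p]) _ (r + 1) hsplit' hiff' hnd']
        have hMin : pvMinRep g p := by
          refine ⟨hpz, fun q hq => ?_⟩
          by_contra hlt
          rw [not_le] at hlt
          have hqz : pvZero g q := pv_conn_zero hpz hq
          have hqL : q ∈ L := hkey q ((pv_mem_raster g q).mpr hqz.1) hlt
          exact h0.2 ((hvis p).mpr ⟨q, hqL, hqz, pv_conn_symm hq⟩)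
        rw [pv_repb_cons, (pv_repb_iff g p).mpr hMin]
        simp
        ring
      · rw [if_neg h0]
        have hNotRep : pvRepB g p = false := by
          rw [Bool.eq_false_iff]
          intro hrep
          have hM := (pv_repb_iff g p).mp hrep
          rcases Classical.em (pvVal g p = 0) with hval | hval
          · have hpv : p ∈ vis := by
              by_contra hnv
              exact h0 ⟨hval, hnv⟩
            obtain ⟨p', hp'L, hz, hc⟩ := (hvis p).mp hpv
            have h1 : pvIdx g p ≤ pvIdx g p' := hM.2 p' (pv_conn_symm hc)
            have h2 : pvIdx g p' < pvIdx g p := hLlt p' hp'L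
            omega
          · exact hval hM.1.2
        have hiff' : ∀ x, x ∈ vis ↔ ∃ p', p' ∈ L ++ [p] ∧ pvZero g p' ∧ pvConn g p' x := by
          intro x
          rw [hvis x]
          constructor
          · rintro ⟨p', hp'L, hz, hc⟩
            exact ⟨p', List.mem_append_left _ hp'L, hz, hc⟩
          · rintro ⟨p', hp', hz, hc⟩
            rcases List.mem_append.mp hp' with hp' | hp'
            · exact ⟨p', hp', hz, hc⟩
            · have hpe : p' = p := List.mem_singleton.mp hp'
              have hpv : p ∈ vis := by
                by_contra hnv
                exact h0 ⟨(hpe ▸ hz : pvZero g p).2, hnv⟩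
              obtain ⟨p'', hp''L, hz'', hc''⟩ := (hvis p).mp hpv
              exact ⟨p'', hp''L, hz'', hc''.trans (hpe ▸ hc)⟩
        rw [ih (L ++ [p]) vis r hsplit' hiff' hnd, pv_repb_cons, hNotRep]
        simp

lemma pv_countRegions_eq (g : List (List Int)) : countRegions g = repCount g (pvRaster g) := by
  unfold countRegions
  rw [pv_scan g (pvRaster g) [] [] 0 (by simp) (by simp) (by simp)]
  simp

-- ---------- B side: label relaxation computes the component minima ----------
lemma pv_mem_zList (g : List (List Int)) (p : Int × Int) : p ∈ zList g ↔ pvZero g p := by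
  simp [zList, List.mem_filter, pv_mem_raster, pvZero]

lemma pv_zList_nodup (g : List (List Int)) : (zList g).Nodup := by
  exact (pv_raster_nodup g).filter _

lemma pv_labInit_eq (g : List (List Int)) : labInit g = mapForm g (pvIdx g) := by
  unfold labInit mapForm zList
  generalize pvRaster g = l
  induction l with
  | nil => simp
  | cons a l ih =>
      simp only [List.filterMap_cons, List.filter_cons]
      by_cases h : pvVal g a = 0 <;> simp [h, ih]

lemma pv_labGet_map (g : List (List Int)) (F : Int × Int → Int) (q : Int × Int) :
    labGet (mapForm g F) q = if q ∈ zList g then some (F q) else none := by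
  unfold labGet mapForm
  generalize zList g = l
  induction l with
  | nil => simp
  | cons a l ih =>
      simp only [List.map_cons, List.find?_cons]
      by_cases h : a = q
      · subst h; simp
      · have : (decide ((a, F a).1 = q)) = false := by simp [h]
        rw [this, ih]
        simp [List.mem_cons, Ne.symm h]

lemma pv_bestOf_eq (g : List (List Int)) (F : Int × Int → Int) (p : Int × Int) :
    bestOf (mapForm g F) p (F p) = SwF g F p := by
  unfold bestOf SwF
  have hfn : (fun (b : Int) (q : Int × Int) =>
      match labGet (mapForm g F) q with
      | some w => if w < b then w else b
      | none => b) = swStep g F := by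
    funext b q
    rw [pv_labGet_map]
    unfold swStep
    by_cases hq : q ∈ zList g <;> simp [hq]
  rw [hfn]

lemma pv_fold_pairs (h : (Int × Int) × Int → (Int × Int) × Int) (c : (Int × Int) × Int → Bool) :
    ∀ (l : List ((Int × Int) × Int)) (A : List ((Int × Int) × Int)) (b : Bool),
      l.foldl (fun acc e => (acc.1 ++ [h e], acc.2 || c e)) (A, b) = (A ++ l.map h, b || l.any c) := by
  intro l
  induction l with
  | nil => intro A b; simp
  | cons a l ih =>
      intro A b
      simp only [List.foldl_cons, List.map_cons, List.any_cons, ih]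
      simp [Bool.or_assoc]

lemma pv_sweep_eq (g : List (List Int)) (F : Int × Int → Int) :
    sweep (mapForm g F) =
      (mapForm g (SwF g F), (zList g).any (fun p => decide (SwF g F p ≠ F p))) := by
  unfold sweep
  have hfold := pv_fold_pairs (fun e => (e.1, bestOf (mapForm g F) e.1 e.2))
    (fun e => decide (bestOf (mapForm g F) e.1 e.2 ≠ e.2)) (mapForm g F) [] false
  simp only [List.nil_append, Bool.false_or] at hfold
  rw [hfold]
  have hone : ∀ p : Int × Int, bestOf (mapForm g F) p (F p) = SwF g F p := fun p => pv_bestOf_eq g F p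
  have hmap : List.map (fun e => (e.1, bestOf (mapForm g F) e.1 e.2)) (mapForm g F)
      = mapForm g (SwF g F) := by
    show List.map _ ((zList g).map (fun p => (p, F p))) = _
    rw [List.map_map]
    unfold mapForm
    apply List.map_congr_left
    intro p _
    show (p, bestOf (mapForm g F) p (F p)) = (p, SwF g F p)
    rw [hone p]
  have hany : (mapForm g F).any (fun e => decide (bestOf (mapForm g F) e.1 e.2 ≠ e.2))
      = (zList g).any (fun p => decide (SwF g F p ≠ F p)) := by
    show ((zList g).map (fun p => (p, F p))).any _ = _
    rw [List.any_map]
    congr 1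
    funext p
    show decide (bestOf (mapForm g F) p (F p) ≠ F p) = _
    rw [hone p]
  rw [hmap, hany]

lemma pv_swstep_le (g : List (List Int)) (F : Int × Int → Int) (b : Int) (q : Int × Int) :
    swStep g F b q ≤ b := by
  unfold swStep; split_ifs <;> omega

lemma pv_fold_swstep_le (g : List (List Int)) (F : Int × Int → Int) :
    ∀ (l : List (Int × Int)) (init : Int), l.foldl (swStep g F) init ≤ init := by
  intro l
  induction l with
  | nil => intro init; simp
  | cons a l ih =>
      intro init
      calc l.foldl (swStep g F) (swStep g F init a) ≤ swStep g F init a := ih _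
        _ ≤ init := pv_swstep_le g F init a

lemma pv_fold_swstep_le_mem (g : List (List Int)) (F : Int × Int → Int) :
    ∀ (l : List (Int × Int)) (init : Int) (q : Int × Int), q ∈ l → q ∈ zList g →
      l.foldl (swStep g F) init ≤ F q := by
  intro l
  induction l with
  | nil => intro _ _ h; simp at h
  | cons a l ih =>
      intro init q hq hz
      rcases List.mem_cons.mp hq with rfl | hq
      · calc l.foldl (swStep g F) (swStep g F init q) ≤ swStep g F init q :=
              pv_fold_swstep_le g F l _
          _ ≤ F q := by
              have h2 : swStep g F init q = if F q < init then F q else init := by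
                unfold swStep; simp [hz]
              rw [h2]; split_ifs <;> omega
      · exact ih _ q hq hz

lemma pv_fold_swstep_cases (g : List (List Int)) (F : Int × Int → Int) :
    ∀ (l : List (Int × Int)) (init : Int),
      l.foldl (swStep g F) init = init ∨
      ∃ q ∈ l, q ∈ zList g ∧ l.foldl (swStep g F) init = F q := by
  intro l
  induction l with
  | nil => intro init; left; simp
  | cons a l ih =>
      intro init
      simp only [List.foldl_cons]
      have hstep : swStep g F init a = init ∨ (a ∈ zList g ∧ swStep g F init a = F a) := by
        unfold swStep; split_ifs with h1 h2
        · exact Or.inr ⟨h1, rfl⟩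
        · exact Or.inl rfl
        · exact Or.inl rfl
      rcases ih (swStep g F init a) with h | ⟨q, hql, hqz, h⟩
      · rcases hstep with h2 | ⟨hz, h2⟩
        · left; rw [h, h2]
        · right; exact ⟨a, List.mem_cons_self, hz, by rw [h, h2]⟩
      · right; exact ⟨q, List.mem_cons_of_mem _ hql, hqz, h⟩

lemma pv_swf_le (g : List (List Int)) (F : Int × Int → Int) (p : Int × Int) :
    SwF g F p ≤ F p := by
  exact pv_fold_swstep_le g F _ _

lemma pv_swf_le_nbr (g : List (List Int)) (F : Int × Int → Int) {p q : Int × Int}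
    (hq : q ∈ pvNbrs p) (hz : q ∈ zList g) : SwF g F p ≤ F q := by
  exact pv_fold_swstep_le_mem g F _ _ q hq hz

lemma pv_swf_cases (g : List (List Int)) (F : Int × Int → Int) (p : Int × Int) :
    SwF g F p = F p ∨ ∃ q ∈ pvNbrs p, q ∈ zList g ∧ SwF g F p = F q := by
  exact pv_fold_swstep_cases g F _ _

lemma pv_swf_congr (g : List (List Int)) {F F' : Int × Int → Int}
    (h : ∀ q, pvZero g q → F q = F' q) {p : Int × Int} (hp : pvZero g p) :
    SwF g F p = SwF g F' p := by
  have hstep : swStep g F = swStep g F' := by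
    funext b q
    unfold swStep
    by_cases hq : q ∈ zList g
    · rw [h q ((pv_mem_zList g q).mp hq)]
    · simp [hq]
  unfold SwF
  rw [hstep, h p hp]

lemma pv_invb_step (g : List (List Int)) {F : Int × Int → Int} (h : INVB g F) :
    INVB g (SwF g F) := by
  intro p hp
  constructor
  · rcases pv_swf_cases g F p with hc | ⟨q, hqn, hqz, hc⟩
    · rw [hc]; exact (h p hp).1
    · have hzq : pvZero g q := (pv_mem_zList g q).mp hqz
      have hadj : pvAdj p q := (pv_adj_iff_nbrs p q).mpr hqn
      have hconn : pvConn g p q := Relation.ReflTransGen.single ⟨hp, hzq, hadj⟩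
      obtain ⟨⟨q', hq', hFq⟩, _⟩ := h q hzq
      exact ⟨q', hconn.trans hq', by rw [hc, hFq]⟩
  · exact le_trans (pv_swf_le g F p) (h p hp).2

lemma pv_sum_lt_aux :
    ∀ (l : List (Int × Int)) (f f' : (Int × Int) → Nat), (∀ x ∈ l, f x ≤ f' x) →
      ∀ p0 ∈ l, f p0 < f' p0 → (l.map f).sum < (l.map f').sum := by
  intro l
  induction l with
  | nil => intro _ _ _ p0 h; simp at h
  | cons a l ih =>
      intro f f' hle p0 hp0 hlt
      simp only [List.map_cons, List.sum_cons]
      rcases List.mem_cons.mp hp0 with rfl | hp0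
      · have : (l.map f).sum ≤ (l.map f').sum :=
          List.sum_le_sum (fun x hx => hle x (List.mem_cons_of_mem _ hx))
        omega
      · have h1 : f a ≤ f' a := hle a List.mem_cons_self
        have h2 : (l.map f).sum < (l.map f').sum :=
          ih f f' (fun x hx => hle x (List.mem_cons_of_mem _ hx)) p0 hp0 hlt
        omega

lemma pv_sum_lt (g : List (List Int)) {F : Int × Int → Int} (hI : INVB g F)
    (p0 : Int × Int) (hp0 : p0 ∈ zList g) (hne : SwF g F p0 ≠ F p0) :
    sumM g (SwF g F) < sumM g F := by
  have hI' := pv_invb_step g hI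
  unfold sumM
  apply pv_sum_lt_aux
  · intro x hx
    exact Int.toNat_le_toNat (pv_swf_le g F x)
  · exact hp0
  · have hz0 : pvZero g p0 := (pv_mem_zList g p0).mp hp0
    have hnn : 0 ≤ SwF g F p0 := by
      obtain ⟨⟨q, hconn, hFq⟩, _⟩ := hI' p0 hz0
      have hzq : pvZero g q := pv_conn_zero hz0 hconn
      rw [hFq]
      exact pv_idx_nonneg hzq.1
    have hlt : SwF g F p0 < F p0 := lt_of_le_of_ne (pv_swf_le g F p0) hne
    omega

lemma pv_labLoop_spec (g : List (List Int)) :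
    ∀ (fuel : Nat) (F : Int × Int → Int), INVB g F → sumM g F < fuel →
      ∃ F', labLoop fuel (mapForm g F) = mapForm g F' ∧ INVB g F' ∧
        ∀ p ∈ zList g, SwF g F' p = F' p := by
  intro fuel
  induction fuel with
  | zero => intro F _ hlt; omega
  | succ f ih =>
      intro F hI hlt
      simp only [labLoop, pv_sweep_eq]
      by_cases hf : (zList g).any (fun p => decide (SwF g F p ≠ F p)) = true
      · simp only [hf, if_true]
        obtain ⟨p0, hp0, hne⟩ := List.any_eq_true.mp hf
        have hne' : SwF g F p0 ≠ F p0 := by simpa using hne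
        have hdec := pv_sum_lt g hI p0 hp0 hne'
        exact ih (SwF g F) (pv_invb_step g hI) (by omega)
      · simp only [hf]
        have hall : ∀ p ∈ zList g, SwF g F p = F p := by
          intro p hp
          by_contra hne
          exact hf (List.any_eq_true.mpr ⟨p, hp, by simpa using hne⟩)
        refine ⟨SwF g F, rfl, pv_invb_step g hI, ?_⟩
        intro p hp
        have hz : pvZero g p := (pv_mem_zList g p).mp hp
        calc SwF g (SwF g F) p
            = SwF g F p := pv_swf_congr g (fun q hq => hall q ((pv_mem_zList g q).mpr hq)) hz

lemma pv_sumM_init_lt (g : List (List Int)) : sumM g (pvIdx g) < labFuel g := by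
  unfold sumM labFuel
  set N := (pvRows g).toNat * (pvCols g).toNat with hN
  have hbound : ∀ x ∈ zList g, (pvIdx g x).toNat ≤ N := by
    intro x hx
    have hz : pvZero g x := (pv_mem_zList g x).mp hx
    have h1 := pv_idx_lt hz.1
    have hr : ((pvRows g).toNat : Int) = pvRows g :=
      Int.toNat_of_nonneg (by unfold pvRows; positivity)
    have hc : ((pvCols g).toNat : Int) = pvCols g :=
      Int.toNat_of_nonneg (by unfold pvCols; positivity)
    have h2 : (N : Int) = pvRows g * pvCols g := by
      rw [hN]; push_cast; rw [hr, hc]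
    omega
  have hsum := List.sum_le_card_nsmul ((zList g).map (fun p => (pvIdx g p).toNat)) N
    (by intro x hx; obtain ⟨p, hp, rfl⟩ := List.mem_map.mp hx; exact hbound p hp)
  have hlen : (zList g).length ≤ N := by
    rw [hN, ← pv_raster_length g]
    exact pv_length_le_of_nodup_subset (pv_zList_nodup g) (fun x hx => List.mem_of_mem_filter hx)
  simp only [List.length_map, smul_eq_mul] at hsum
  have : (zList g).length * N ≤ N * N := Nat.mul_le_mul_right N hlen
  calc ((zList g).map (fun p => (pvIdx g p).toNat)).sum ≤ (zList g).length * N := hsum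
    _ ≤ N * N := this
    _ < N ^ 2 + 1 := by ring_nf; omega

lemma pv_fix_conn_eq (g : List (List Int)) {F : Int × Int → Int}
    (hfix : ∀ p ∈ zList g, SwF g F p = F p) {p q : Int × Int}
    (h : pvConn g p q) : F p = F q := by
  have key : ∀ a b, pvStep g a b → F a ≤ F b := by
    rintro a b ⟨ha, hb, hadj⟩
    calc F a = SwF g F a := (hfix a ((pv_mem_zList g a).mpr ha)).symm
      _ ≤ F b := pv_swf_le_nbr g F ((pv_adj_iff_nbrs a b).mp hadj) ((pv_mem_zList g b).mpr hb)
  have h1 : ∀ {a b : Int × Int}, pvConn g a b → F a ≤ F b := by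
    intro a b hab
    induction hab with
    | refl => exact le_refl _
    | tail _ hstep ih => exact le_trans ih (key _ _ hstep)
  exact le_antisymm (h1 h) (h1 (pv_conn_symm h))

lemma pv_fix_minrep (g : List (List Int)) {F : Int × Int → Int} (hI : INVB g F)
    (hfix : ∀ p ∈ zList g, SwF g F p = F p) {p : Int × Int} (hp : pvZero g p) :
    F p = pvIdx g p ↔ pvMinRep g p := by
  constructor
  · intro hF
    refine ⟨hp, fun q hq => ?_⟩
    have heq : F p = F q := pv_fix_conn_eq g hfix hq
    have hzq : pvZero g q := pv_conn_zero hp hq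
    have h2 : F q ≤ pvIdx g q := (hI q hzq).2
    omega
  · intro hM
    obtain ⟨⟨q, hconn, hFq⟩, hle⟩ := hI p hp
    have h2 : pvIdx g p ≤ pvIdx g q := hM.2 q hconn
    omega

lemma pv_fold_count (g : List (List Int)) :
    ∀ (l : List ((Int × Int) × Int)) (c : Int),
      l.foldl (fun c e => if e.2 = pvIdx g e.1 then c + 1 else c) c
        = c + (l.countP (fun e => decide (e.2 = pvIdx g e.1)) : Int) := by
  intro l
  induction l with
  | nil => intro c; simp
  | cons a l ih =>
      intro c
      simp only [List.foldl_cons, List.countP_cons, ih]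
      by_cases h : a.2 = pvIdx g a.1 <;> simp [h] <;> omega

lemma pv_cclCount_eq (g : List (List Int)) : cclCount g = repCount g (pvRaster g) := by
  unfold cclCount
  rw [pv_labInit_eq]
  have hInit : INVB g (pvIdx g) := fun p _ => ⟨⟨p, Relation.ReflTransGen.refl, rfl⟩, le_refl _⟩
  obtain ⟨F', hres, hI, hfix⟩ := pv_labLoop_spec g (labFuel g) (pvIdx g) hInit (pv_sumM_init_lt g)
  rw [hres, pv_fold_count g _ 0]
  unfold repCount
  rw [Int.zero_add]
  congr 1
  unfold mapForm
  rw [List.countP_map]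
  unfold zList
  rw [List.countP_filter]
  apply List.countP_congr
  intro p hp
  simp only [Function.comp_apply, Bool.and_eq_true, decide_eq_true_eq, pv_repb_iff]
  constructor
  · rintro ⟨h1, h2⟩
    have hz : pvZero g p := ⟨(pv_mem_raster g p).mp hp, h2⟩
    exact (pv_fix_minrep g hI hfix hz).mp h1
  · intro hM
    have hz : pvZero g p := hM.1
    exact ⟨(pv_fix_minrep g hI hfix hz).mpr hM, hz.2⟩

-- ---------- both counts agree, hence the two programs agree ----------
lemma pv_counts_agree (g : List (List Int)) : countRegions g = cclCount g := by
  rw [pv_countRegions_eq, pv_cclCount_eq]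

lemma pv_solve_eq (grid : List (List Int)) : solve grid = solve_alt grid := by
  unfold solve solve_alt
  simp only [pv_counts_agree]

-- ===== VERDICT (by name: the statement is the Claim_ definition above) =====
theorem solve_spec : Claim_equal_solve := by
  intro grid _ _
  exact pv_solve_eq grid
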